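-- pv_equiv track=rewrite | github.com/ilyasemenov1/NumsFromKEGECourse | 23/hw/ex2.py | f
-- ===== SOURCE A (Python) =====
-- def f(n,k,c=0):
--     if n>k: return 0
--     if n==k and c==2: return 1
--     h=[
--         f(n+1, k, 1),
--         f(n+2, k, 2)
--     ]
--     return sum(h)
-- ===== SOURCE B (Python) =====
-- def f(n, k, c=0):
--     # Bottom-up DP over positions (rolling variables) instead of A's exponential recursion.
--     if n > k:
--         return 0
--     if n == k:
--         return 1 if c == 2 else 0
--     # p1 = value at m with last step +1, p2 = value at m with last step +2,
--     # q2 = value-with-last-step-+2 at m+1; start at m = k.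
--     p1, p2, q2 = 0, 1, 0
--     m = k - 1
--     while m > n:
--         cur = p1 + q2
--         p1, p2, q2 = cur, cur, p2
--         m -= 1
--     return p1 + q2
-- ===== Notes on version B (the rewrite author's own statement) =====
-- stated objective: alternative
-- what changed: Replaced A's exponential double recursion by a bottom-up DP loop with three rolling variables walking from k down to n.
import Mathlib
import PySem

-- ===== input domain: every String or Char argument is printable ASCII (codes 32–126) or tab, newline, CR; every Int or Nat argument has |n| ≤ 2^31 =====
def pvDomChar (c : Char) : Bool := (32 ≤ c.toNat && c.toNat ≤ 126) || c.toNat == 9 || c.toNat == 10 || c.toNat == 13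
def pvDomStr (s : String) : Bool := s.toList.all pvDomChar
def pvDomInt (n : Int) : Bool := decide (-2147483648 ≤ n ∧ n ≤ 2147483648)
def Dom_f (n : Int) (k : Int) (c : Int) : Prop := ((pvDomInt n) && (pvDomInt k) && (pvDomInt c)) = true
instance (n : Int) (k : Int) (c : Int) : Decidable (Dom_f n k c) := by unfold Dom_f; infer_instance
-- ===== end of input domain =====

-- ===== PORT A =====
def f (n : Int) (k : Int) (c : Int) : Int :=
  if n > k then 0
  else if n = k ∧ c = 2 then 1
  else
    let h : List Int := [f (n+1) k 1, f (n+2) k 2]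
    h.sum
termination_by (k - n + 2).toNat
decreasing_by all_goals omega


-- B: bottom-up DP with rolling variables instead of A's double recursion.\n-- ===== PORT B =====
def floopB : Nat → Int × Int × Int → Int × Int × Int
  | 0, s => s
  | t+1, (p1, _p2, q2) => floopB t (p1 + q2, p1 + q2, _p2)

def f_alt (n : Int) (k : Int) (c : Int) : Int :=
  if n > k then 0
  else if n = k then (if c = 2 then 1 else 0)
  else
    let s := floopB (k - 1 - n).toNat (0, 1, 0)
    s.1 + s.2.2


-- ===== PRECONDITION & SPEC =====
-- Pre_f excludes only inputs on which A raises: A recurses to depth about k - n, so for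
-- k - n beyond Python's recursion limit A raises RecursionError instead of returning.
def Pre_f (n : Int) (k : Int) (c : Int) : Prop := k - n ≤ 900
instance (n : Int) (k : Int) (c : Int) : Decidable (Pre_f n k c) := by unfold Pre_f; infer_instance
def pvWitness_f : Int × Int × Int := (1, 5, 0)
def Spec_f (n : Int) (k : Int) (c : Int) (out : Int) : Prop := out = f_alt n k c
instance (n : Int) (k : Int) (c : Int) (out : Int) : Decidable (Spec_f n k c out) := by unfold Spec_f; infer_instance

-- ===== CLAIM (what is proved, stated in full; the proofs are below) =====
def Claim_equal_f : Prop := ∀ (n : Int) (k : Int) (c : Int), Dom_f n k c → Pre_f n k c → Spec_f n k c (f n k c)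

-- ===== LEMMAS AND PROOFS =====\n
theorem f_gt {n k : Int} (c : Int) (h : k < n) : f n k c = 0 := by
  unfold f; simp [if_pos h]

theorem f_lt_step {n k : Int} (c : Int) (h : n < k) :
    f n k c = f (n+1) k 1 + f (n+2) k 2 := by
  rw [f, if_neg (by omega), if_neg (by intro ⟨e, _⟩; omega)]
  simp

theorem f_eq_self (k c : Int) : f k k c = (if c = 2 then 1 else 0) := by
  by_cases hc : c = 2
  · rw [f, if_neg (by omega), if_pos ⟨rfl, hc⟩, if_pos hc]
  · rw [f, if_neg (by omega), if_neg (by intro ⟨_, e⟩; exact hc e), if_neg hc]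
    rw [show [f (k+1) k 1, f (k+2) k 2].sum = f (k+1) k 1 + f (k+2) k 2 by simp]
    rw [f_gt 1 (by omega), f_gt 2 (by omega)]
    norm_num

theorem floopB_inv (k : Int) : ∀ (t : Nat) (m : Int), m ≤ k →
    floopB t (f m k 1, f m k 2, f (m+1) k 2)
      = (f (m - t) k 1, f (m - t) k 2, f (m - t + 1) k 2) := by
  intro t
  induction t with
  | zero => intro m _; simp [floopB]
  | succ t ih =>
    intro m hm
    have e1 : m - 1 + 1 = m := by ring
    have e2 : m - 1 + 2 = m + 1 := by ring
    have h1 := f_lt_step (n := m - 1) (k := k) 1 (by omega)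
    have h2 := f_lt_step (n := m - 1) (k := k) 2 (by omega)
    rw [e1, e2] at h1 h2
    have key : (f m k 1 + f (m+1) k 2, f m k 1 + f (m+1) k 2, f m k 2)
        = (f (m-1) k 1, f (m-1) k 2, f (m-1+1) k 2) := by
      rw [h1, h2, e1]
    have hih := ih (m - 1) (by omega)
    rw [e1] at hih
    rw [floopB, key, e1, hih]
    have e3 : m - 1 - (t : Int) = m - ((t + 1 : Nat) : Int) := by push_cast; ring
    rw [e3]

-- ===== VERDICT (by name: the statement is the Claim_ definition above) =====
theorem f_spec : Claim_equal_f := by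
  unfold Claim_equal_f Spec_f
  intro n k c _ _
  by_cases hgt : n > k
  · rw [f_gt c hgt]; unfold f_alt; rw [if_pos hgt]
  · by_cases heq : n = k
    · subst heq
      unfold f_alt
      rw [if_neg hgt, if_pos rfl, f_eq_self]
    · have hlt : n < k := by omega
      unfold f_alt
      simp only [if_neg hgt, if_neg heq]
      have init : ((0 : Int), (1 : Int), (0 : Int)) = (f k k 1, f k k 2, f (k+1) k 2) := by
        rw [f_eq_self, f_eq_self, f_gt 2 (by omega)]
        norm_num
      rw [init, floopB_inv k _ k (le_refl k)]
      have harg : k - ((k - 1 - n).toNat : Int) = n + 1 := by omega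
      rw [harg, show n + 1 + 1 = n + 2 by ring, ← f_lt_step c hlt]
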